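-- pv_equiv track=rewrite | github.com/doostiyan/nubirobot | app-blockchain/api/common_apis/web3.py | split_batch_inpt_data
-- ===== SOURCE A (Python) =====
-- def split_batch_inpt_data(input_data, splitter):
--     parts = []
--     current_part = ""
--
--     for i in range(0, len(input_data), 64):
--         chunk = input_data[i:i + 64]  # Chunk input data into 64-character part
--         if chunk == splitter:  # Check if the chunk is the splitter
--             if current_part:
--                 parts.append(current_part)
--             current_part = ""
--         else:
--             current_part += chunk
--
--     if current_part:
--         parts.append(current_part)
--
--     return parts
-- ===== SOURCE B (Python) =====
-- def split_batch_inpt_data(input_data, splitter):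
--     # Phase 1: build the full list of 64-char chunks.
--     chunks = [input_data[i:i + 64] for i in range(0, len(input_data), 64)]
--     # Phase 2: group adjacent chunks into runs keyed by "is the splitter".
--     groups = []
--     for c in chunks:
--         k = (c == splitter)
--         if groups and groups[-1][0] == k:
--             groups[-1][1].append(c)
--         else:
--             groups.append((k, [c]))
--     # Phase 3: join each non-splitter run, in order.
--     return [''.join(run) for k, run in groups if not k]
-- ===== Notes on version B (the rewrite author's own statement) =====
-- stated objective: idiomatic
-- what changed: Replaces A's one-pass flag-and-string-accumulator loop by a three-phase pipeline: build the full 64-char chunk list, group adjacent chunks into runs keyed by equality with the splitter, then join each non-splitter run.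
import Mathlib
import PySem

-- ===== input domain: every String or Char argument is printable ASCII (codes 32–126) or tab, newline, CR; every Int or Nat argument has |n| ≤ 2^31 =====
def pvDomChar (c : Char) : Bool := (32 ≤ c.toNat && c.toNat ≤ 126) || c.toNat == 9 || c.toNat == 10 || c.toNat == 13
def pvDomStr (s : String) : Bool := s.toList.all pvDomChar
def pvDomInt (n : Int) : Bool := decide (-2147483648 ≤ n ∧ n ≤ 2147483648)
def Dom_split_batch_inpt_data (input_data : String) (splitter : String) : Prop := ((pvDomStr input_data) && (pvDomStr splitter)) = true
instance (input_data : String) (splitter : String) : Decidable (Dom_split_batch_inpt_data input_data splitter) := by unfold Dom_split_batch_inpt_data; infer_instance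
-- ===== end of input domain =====

-- B replaces A's one-pass flag+string-accumulator loop by a three-phase pipeline
-- (chunk list, group into runs by key, join non-splitter runs); same values, no speed claim.

-- ===== PORT A =====
def split_batch_inpt_data (input_data : String) (splitter : String) : List String :=
  let st := (PySem.List.pyRange 0 (PySem.Str.len input_data) 64).foldl
    (fun (st : List String × String) i =>
      let chunk := PySem.Str.slice input_data (some i) (some (i + 64))
      if chunk == splitter then
        ((if st.2 ≠ "" then st.1 ++ [st.2] else st.1), "")
      else
        (st.1, st.2 ++ chunk)) ([], "")
  if st.2 ≠ "" then st.1 ++ [st.2] else st.1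

-- ===== PORT B =====
-- helper: Python's "append to the run list" step — extend the last group if its key
-- matches, else start a new group at the end (faithful to B's in-place list mutation).
def pvAddChunk (gs : List (Bool × List String)) (k : Bool) (c : String) : List (Bool × List String) :=
  match gs with
  | [] => [(k, [c])]
  | [g] => if g.1 = k then [(g.1, g.2 ++ [c])] else [g, (k, [c])]
  | g :: rest => g :: pvAddChunk rest k c

def split_batch_inpt_data_alt (input_data : String) (splitter : String) : List String :=
  let chunks := (PySem.List.pyRange 0 (PySem.Str.len input_data) 64).map
    (fun i => PySem.Str.slice input_data (some i) (some (i + 64)))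
  let groups := chunks.foldl (fun gs c => pvAddChunk gs (c == splitter) c) []
  groups.filterMap (fun g => if g.1 then none else some (PySem.Str.join "" g.2))

-- ===== PRECONDITION & SPEC =====
def Spec_split_batch_inpt_data (input_data : String) (splitter : String) (out : List String) : Prop := out = split_batch_inpt_data_alt input_data splitter
instance (input_data : String) (splitter : String) (out : List String) : Decidable (Spec_split_batch_inpt_data input_data splitter out) := by unfold Spec_split_batch_inpt_data; infer_instance

-- ===== CLAIM (what is proved, stated in full; the proofs are below) =====
def Claim_equal_split_batch_inpt_data : Prop := ∀ (input_data : String) (splitter : String), Dom_split_batch_inpt_data input_data splitter → Spec_split_batch_inpt_data input_data splitter (split_batch_inpt_data input_data splitter)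

-- ===== LEMMAS AND PROOFS =====

-- A's loop body, as a function of the chunk it processes.
def pvStepA (splitter : String) (st : List String × String) (c : String) : List String × String :=
  if c == splitter then ((if st.2 ≠ "" then st.1 ++ [st.2] else st.1), "") else (st.1, st.2 ++ c)

-- A's final flush.
def pvFinish (st : List String × String) : List String :=
  if st.2 ≠ "" then st.1 ++ [st.2] else st.1

-- B's extraction of the result from the group list.
def pvExtract (gs : List (Bool × List String)) : List String :=
  gs.filterMap (fun g => if g.1 then none else some (PySem.Str.join "" g.2))

theorem pvIntercalate_nil (g : List (List Char)) : List.intercalate ([] : List Char) g = g.flatten := by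
  simp [List.intercalate]
  induction g with
  | nil => simp
  | cons a t ih => cases t <;> simp_all [List.intersperse]

theorem pvJoin_empty_append (g : List String) (c : String) :
    PySem.Str.join "" (g ++ [c]) = PySem.Str.join "" g ++ c := by
  apply String.toList_inj.mp
  simp [PySem.Str.toList_join, PySem.Chars.join, pvIntercalate_nil]

theorem pvJoin_empty_singleton (c : String) : PySem.Str.join "" [c] = c := by
  apply String.toList_inj.mp
  simp [PySem.Str.toList_join, PySem.Chars.join, pvIntercalate_nil]

theorem pvExtract_append (xs ys : List (Bool × List String)) :
    pvExtract (xs ++ ys) = pvExtract xs ++ pvExtract ys := by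
  simp [pvExtract]

theorem pvAddChunk_cons₂ (a b : Bool × List String) (l : List (Bool × List String))
    (k : Bool) (c : String) :
    pvAddChunk (a :: b :: l) k c = a :: pvAddChunk (b :: l) k c := rfl

theorem pvAddChunk_same (gs : List (Bool × List String)) (k : Bool) (g : List String) (c : String) :
    pvAddChunk (gs ++ [(k, g)]) k c = gs ++ [(k, g ++ [c])] := by
  induction gs with
  | nil => simp [pvAddChunk]
  | cons a t ih =>
    cases t with
    | nil => simp [pvAddChunk]
    | cons b u =>
      simp only [List.cons_append, pvAddChunk_cons₂]
      simpa using congrArg (a :: ·) ih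

theorem pvAddChunk_diff (gs : List (Bool × List String)) (k' k : Bool) (g : List String) (c : String)
    (h : k' ≠ k) :
    pvAddChunk (gs ++ [(k', g)]) k c = gs ++ [(k', g), (k, [c])] := by
  induction gs with
  | nil => simp [pvAddChunk, h]
  | cons a t ih =>
    cases t with
    | nil => simp [pvAddChunk, h]
    | cons b u =>
      simp only [List.cons_append, pvAddChunk_cons₂]
      simpa using congrArg (a :: ·) ih

-- the invariant linking A's (parts, current_part) to B's group list
def pvRel (parts : List String) (cur : String) (gs : List (Bool × List String)) : Prop :=
  (cur = "" ∧ gs = [] ∧ parts = [])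
  ∨ (∃ q g, gs = q ++ [(true, g)] ∧ cur = "" ∧ pvExtract gs = parts)
  ∨ (∃ q g, gs = q ++ [(false, g)] ∧ cur ≠ "" ∧ PySem.Str.join "" g = cur ∧ pvExtract q = parts)

theorem pvAppend_ne_empty (a c : String) (hc : c ≠ "") : a ++ c ≠ "" := by
  intro h
  apply hc
  apply String.toList_inj.mp
  have := congrArg String.toList h
  simp [String.toList_append] at this
  simp [this]

theorem pvMain (splitter : String) (cs : List String) :
    ∀ (parts : List String) (cur : String) (gs : List (Bool × List String)),
    (∀ c ∈ cs, c ≠ "") → pvRel parts cur gs →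
    pvFinish (cs.foldl (pvStepA splitter) (parts, cur)) =
      pvExtract (cs.foldl (fun gs c => pvAddChunk gs (c == splitter) c) gs) := by
  induction cs with
  | nil =>
    intro parts cur gs _ hrel
    rcases hrel with ⟨hc, hg, hp⟩ | ⟨q, g, hg, hc, he⟩ | ⟨q, g, hg, hc, hj, he⟩
    · simp [pvFinish, pvExtract, hc, hg, hp]
    · simp [pvFinish, hc, he]
    · simp [pvFinish, hc, hg, pvExtract, hj, ← he]
  | cons c cs ih =>
    intro parts cur gs hne hrel
    have hc : c ≠ "" := hne c (by simp)
    have hne' : ∀ x ∈ cs, x ≠ "" := fun x hx => hne x (by simp [hx])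
    simp only [List.foldl_cons]
    by_cases hs : c = splitter
    · -- splitter chunk
      have hstep : pvStepA splitter (parts, cur) c =
          ((if cur ≠ "" then parts ++ [cur] else parts), "") := by
        simp [pvStepA, hs]
      rw [hstep]
      apply ih _ _ _ hne'
      rcases hrel with ⟨hcur, hg, hp⟩ | ⟨q, g, hg, hcur, he⟩ | ⟨q, g, hg, hcur, hj, he⟩
      · subst hg hp
        right; left
        refine ⟨[], [c], by simp [pvAddChunk, hs], rfl, ?_⟩
        simp [pvAddChunk, hs, pvExtract, hcur]
      · subst hg
        right; left
        refine ⟨q, g ++ [c], ?_, rfl, ?_⟩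
        · simp [hs, pvAddChunk_same]
        · rw [show (c == splitter) = true by simp [hs], pvAddChunk_same]
          simp [pvExtract] at he ⊢
          simpa [hcur] using he
      · subst hg
        right; left
        refine ⟨q ++ [(false, g)], [c], ?_, rfl, ?_⟩
        · rw [show (c == splitter) = true by simp [hs],
            pvAddChunk_diff _ false true g c (by simp)]
          simp
        · rw [show (c == splitter) = true by simp [hs],
            pvAddChunk_diff _ false true g c (by simp)]
          simp [hcur, pvExtract, hj, ← he]
    · -- ordinary chunk
      have hstep : pvStepA splitter (parts, cur) c = (parts, cur ++ c) := by
        simp [pvStepA, hs]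
      rw [hstep]
      apply ih _ _ _ hne'
      rcases hrel with ⟨hcur, hg, hp⟩ | ⟨q, g, hg, hcur, he⟩ | ⟨q, g, hg, hcur, hj, he⟩
      · subst hg hp
        right; right
        refine ⟨[], [c], ?_, ?_, ?_, ?_⟩
        · simp [pvAddChunk, hs]
        · simpa [hcur] using hc
        · simp [pvJoin_empty_singleton, hcur]
        · simp [pvExtract]
      · subst hg
        right; right
        refine ⟨q ++ [(true, g)], [c], ?_, ?_, ?_, ?_⟩
        · rw [show (c == splitter) = false by simp [hs],
            pvAddChunk_diff _ true false g c (by simp)]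
          simp
        · simpa [hcur] using hc
        · simp [pvJoin_empty_singleton, hcur]
        · simpa [pvExtract_append, pvExtract] using he
      · subst hg
        right; right
        refine ⟨q, g ++ [c], ?_, ?_, ?_, he⟩
        · rw [show (c == splitter) = false by simp [hs], pvAddChunk_same]
        · exact pvAppend_ne_empty _ _ hc
        · rw [pvJoin_empty_append, hj]

-- every chunk produced by the range loop is non-empty
theorem pvChunk_ne_empty (s : String) (i : Int)
    (hi : i ∈ PySem.List.pyRange 0 (PySem.Str.len s) 64) :
    PySem.Str.slice s (some i) (some (i + 64)) ≠ "" := by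
  have hmem := (PySem.List.mem_pyRange_iff_of_pos (by norm_num : (0:Int) < 64) i).mp hi
  obtain ⟨h0, hlt, -⟩ := hmem
  intro h
  have htl := congrArg String.toList h
  rw [PySem.Str.toList_slice] at htl
  rw [PySem.Chars.slice_eq_listSlice] at htl
  rw [PySem.List.slice_toNat _ h0 (by omega)] at htl
  have hl2 : PySem.Str.len s = (s.toList.length : Int) := PySem.Str.len_eq s
  have hlen : i.toNat < s.toList.length := by omega
  have h64 : (i + 64).toNat - i.toNat = 64 := by omega
  rw [h64] at htl
  have h0len : (List.take 64 (List.drop i.toNat s.toList)).length = 0 := by simp [htl]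
  rw [List.length_take, List.length_drop] at h0len
  omega

theorem pvA_eq (s sp : String) :
    split_batch_inpt_data s sp =
      pvFinish (((PySem.List.pyRange 0 (PySem.Str.len s) 64).map
        (fun i => PySem.Str.slice s (some i) (some (i + 64)))).foldl (pvStepA sp) ([], "")) := by
  rw [List.foldl_map]
  rfl

theorem pvB_eq (s sp : String) :
    split_batch_inpt_data_alt s sp =
      pvExtract (((PySem.List.pyRange 0 (PySem.Str.len s) 64).map
        (fun i => PySem.Str.slice s (some i) (some (i + 64)))).foldl
          (fun gs c => pvAddChunk gs (c == sp) c) []) := rfl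

-- ===== VERDICT (by name: the statement is the Claim_ definition above) =====
theorem split_batch_inpt_data_spec : Claim_equal_split_batch_inpt_data := by
  intro input_data splitter _
  unfold Spec_split_batch_inpt_data
  rw [pvA_eq, pvB_eq]
  have h := pvMain splitter
    ((PySem.List.pyRange 0 (PySem.Str.len input_data) 64).map
      (fun i => PySem.Str.slice input_data (some i) (some (i + 64))))
    [] "" []
    (by
      intro c hcmem
      obtain ⟨i, hi, rfl⟩ := List.mem_map.mp hcmem
      exact pvChunk_ne_empty input_data i hi)
    (Or.inl ⟨rfl, rfl, rfl⟩)
  exact h
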